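-- pv_equiv track=rewrite | github.com/NathanBvumbwe/peza_ganyu | job_rec/job_recommendation/views.py | get_job_icon
-- ===== SOURCE A (Python) =====
-- def get_job_icon(job_title, job_category=None):
--     """
--     Determine the appropriate icon for a job based on title or category
--     """
--     title_lower = job_title.lower()
--
--     # Technology/IT jobs
--     if any(word in title_lower for word in ['developer', 'programmer', 'software', 'engineer', 'coding', 'web', 'app', 'mobile', 'frontend', 'backend', 'fullstack', 'devops', 'data', 'ai', 'machine learning']):
--         return 'fa-laptop-code'
--
--     # Design/Creative jobs
--     elif any(word in title_lower for word in ['designer', 'design', 'creative', 'graphic', 'ui', 'ux', 'art', 'visual', 'illustrator', 'animator']):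
--         return 'fa-paint-brush'
--
--     # Marketing/Sales jobs
--     elif any(word in title_lower for word in ['marketing', 'sales', 'business', 'account', 'manager', 'executive', 'representative', 'consultant']):
--         return 'fa-chart-line'
--
--     # Healthcare jobs
--     elif any(word in title_lower for word in ['nurse', 'doctor', 'medical', 'health', 'care', 'therapist', 'physician', 'dentist', 'pharmacist']):
--         return 'fa-stethoscope'
--
--     # Education jobs
--     elif any(word in title_lower for word in ['teacher', 'professor', 'instructor', 'educator', 'tutor', 'lecturer', 'academic']):
--         return 'fa-graduation-cap'
--
--     # Finance/Accounting jobs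
--     elif any(word in title_lower for word in ['accountant', 'finance', 'financial', 'banking', 'auditor', 'bookkeeper', 'analyst']):
--         return 'fa-calculator'
--
--     # Customer Service jobs
--     elif any(word in title_lower for word in ['customer', 'support', 'service', 'representative', 'assistant', 'help', 'care']):
--         return 'fa-headset'
--
--     # Engineering/Technical jobs
--     elif any(word in title_lower for word in ['engineer', 'technical', 'technician', 'mechanic', 'electrician', 'plumber', 'construction']):
--         return 'fa-cogs'
--
--     # Administrative jobs
--     elif any(word in title_lower for word in ['admin', 'administrative', 'secretary', 'assistant', 'coordinator', 'clerk']):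
--         return 'fa-briefcase'
--
--     # Legal jobs
--     elif any(word in title_lower for word in ['lawyer', 'attorney', 'legal', 'paralegal', 'law']):
--         return 'fa-balance-scale'
--
--     # Science/Research jobs
--     elif any(word in title_lower for word in ['scientist', 'researcher', 'analyst', 'laboratory', 'research', 'phd']):
--         return 'fa-flask'
--
--     # Transportation/Logistics jobs
--     elif any(word in title_lower for word in ['driver', 'delivery', 'logistics', 'transport', 'shipping', 'warehouse']):
--         return 'fa-truck'
--
--     # Hospitality/Tourism jobs
--     elif any(word in title_lower for word in ['hotel', 'restaurant', 'chef', 'cook', 'waiter', 'tourism', 'travel']):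
--         return 'fa-utensils'
--
--     # Media/Entertainment jobs
--     elif any(word in title_lower for word in ['journalist', 'reporter', 'writer', 'editor', 'media', 'entertainment', 'actor', 'musician']):
--         return 'fa-microphone'
--
--     # Government/Public Service jobs
--     elif any(word in title_lower for word in ['government', 'public', 'officer', 'policy', 'civil', 'service']):
--         return 'fa-university'
--
--     # Agriculture/Environment jobs
--     elif any(word in title_lower for word in ['agriculture', 'farming', 'environment', 'conservation', 'forestry']):
--         return 'fa-seedling'
--
--     # Default icon for other jobs
--     else:
--         return 'fa-briefcase'
-- ===== SOURCE B (Python) =====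
-- # B: flatten the keyword groups into one (keyword, priority) index and take the
-- # minimum matching priority in a single pass -- no early-return branch chain.
-- GROUPS = [
--     ['developer', 'programmer', 'software', 'engineer', 'coding', 'web', 'app', 'mobile', 'frontend', 'backend', 'fullstack', 'devops', 'data', 'ai', 'machine learning'],
--     ['designer', 'design', 'creative', 'graphic', 'ui', 'ux', 'art', 'visual', 'illustrator', 'animator'],
--     ['marketing', 'sales', 'business', 'account', 'manager', 'executive', 'representative', 'consultant'],
--     ['nurse', 'doctor', 'medical', 'health', 'care', 'therapist', 'physician', 'dentist', 'pharmacist'],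
--     ['teacher', 'professor', 'instructor', 'educator', 'tutor', 'lecturer', 'academic'],
--     ['accountant', 'finance', 'financial', 'banking', 'auditor', 'bookkeeper', 'analyst'],
--     ['customer', 'support', 'service', 'representative', 'assistant', 'help', 'care'],
--     ['engineer', 'technical', 'technician', 'mechanic', 'electrician', 'plumber', 'construction'],
--     ['admin', 'administrative', 'secretary', 'assistant', 'coordinator', 'clerk'],
--     ['lawyer', 'attorney', 'legal', 'paralegal', 'law'],
--     ['scientist', 'researcher', 'analyst', 'laboratory', 'research', 'phd'],
--     ['driver', 'delivery', 'logistics', 'transport', 'shipping', 'warehouse'],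
--     ['hotel', 'restaurant', 'chef', 'cook', 'waiter', 'tourism', 'travel'],
--     ['journalist', 'reporter', 'writer', 'editor', 'media', 'entertainment', 'actor', 'musician'],
--     ['government', 'public', 'officer', 'policy', 'civil', 'service'],
--     ['agriculture', 'farming', 'environment', 'conservation', 'forestry'],
-- ]
-- PAIRS = [(w, i) for i, ws in enumerate(GROUPS) for w in ws]
-- ICONS = ['fa-laptop-code', 'fa-paint-brush', 'fa-chart-line', 'fa-stethoscope',
--          'fa-graduation-cap', 'fa-calculator', 'fa-headset', 'fa-cogs',
--          'fa-briefcase', 'fa-balance-scale', 'fa-flask', 'fa-truck',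
--          'fa-utensils', 'fa-microphone', 'fa-university', 'fa-seedling',
--          'fa-briefcase']
--
-- def get_job_icon(job_title, job_category=None):
--     t = job_title.lower()
--     best = len(GROUPS)
--     for w, p in PAIRS:
--         if p < best and w in t:
--             best = p
--     return ICONS[best]
-- ===== Notes on version B (the rewrite author's own statement) =====
-- stated objective: alternative
-- what changed: Instead of a 16-branch elif chain with early returns, B flattens all keywords into one (keyword, priority) index, computes the minimum priority among keywords contained in the lowercased title in a single pass, and indexes an icon array with it.
import Mathlib
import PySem

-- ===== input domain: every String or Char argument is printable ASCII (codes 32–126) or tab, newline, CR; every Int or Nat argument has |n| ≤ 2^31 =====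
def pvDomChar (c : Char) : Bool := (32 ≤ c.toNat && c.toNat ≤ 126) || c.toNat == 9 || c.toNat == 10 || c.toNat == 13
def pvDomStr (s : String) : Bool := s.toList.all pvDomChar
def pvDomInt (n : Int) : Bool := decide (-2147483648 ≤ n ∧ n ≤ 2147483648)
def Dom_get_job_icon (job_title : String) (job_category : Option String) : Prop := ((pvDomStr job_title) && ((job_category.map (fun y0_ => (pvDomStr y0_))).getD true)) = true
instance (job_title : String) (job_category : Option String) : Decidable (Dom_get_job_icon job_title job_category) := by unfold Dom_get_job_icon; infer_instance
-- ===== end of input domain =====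

-- B replaces A's 16-branch early-return elif chain by a flattened (keyword, priority) index:
-- one pass computes the minimum priority among matching keywords, then indexes an icon array.
-- job_category is ignored by both, as in the Python.

-- ===== PORT A =====
def get_job_icon (job_title : String) (_job_category : Option String) : String :=
  let t := PySem.Str.lower job_title
  if ["developer", "programmer", "software", "engineer", "coding", "web", "app", "mobile", "frontend", "backend", "fullstack", "devops", "data", "ai", "machine learning"].any (fun w => PySem.Str.isIn w t) then "fa-laptop-code"
  else if ["designer", "design", "creative", "graphic", "ui", "ux", "art", "visual", "illustrator", "animator"].any (fun w => PySem.Str.isIn w t) then "fa-paint-brush"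
  else if ["marketing", "sales", "business", "account", "manager", "executive", "representative", "consultant"].any (fun w => PySem.Str.isIn w t) then "fa-chart-line"
  else if ["nurse", "doctor", "medical", "health", "care", "therapist", "physician", "dentist", "pharmacist"].any (fun w => PySem.Str.isIn w t) then "fa-stethoscope"
  else if ["teacher", "professor", "instructor", "educator", "tutor", "lecturer", "academic"].any (fun w => PySem.Str.isIn w t) then "fa-graduation-cap"
  else if ["accountant", "finance", "financial", "banking", "auditor", "bookkeeper", "analyst"].any (fun w => PySem.Str.isIn w t) then "fa-calculator"
  else if ["customer", "support", "service", "representative", "assistant", "help", "care"].any (fun w => PySem.Str.isIn w t) then "fa-headset"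
  else if ["engineer", "technical", "technician", "mechanic", "electrician", "plumber", "construction"].any (fun w => PySem.Str.isIn w t) then "fa-cogs"
  else if ["admin", "administrative", "secretary", "assistant", "coordinator", "clerk"].any (fun w => PySem.Str.isIn w t) then "fa-briefcase"
  else if ["lawyer", "attorney", "legal", "paralegal", "law"].any (fun w => PySem.Str.isIn w t) then "fa-balance-scale"
  else if ["scientist", "researcher", "analyst", "laboratory", "research", "phd"].any (fun w => PySem.Str.isIn w t) then "fa-flask"
  else if ["driver", "delivery", "logistics", "transport", "shipping", "warehouse"].any (fun w => PySem.Str.isIn w t) then "fa-truck"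
  else if ["hotel", "restaurant", "chef", "cook", "waiter", "tourism", "travel"].any (fun w => PySem.Str.isIn w t) then "fa-utensils"
  else if ["journalist", "reporter", "writer", "editor", "media", "entertainment", "actor", "musician"].any (fun w => PySem.Str.isIn w t) then "fa-microphone"
  else if ["government", "public", "officer", "policy", "civil", "service"].any (fun w => PySem.Str.isIn w t) then "fa-university"
  else if ["agriculture", "farming", "environment", "conservation", "forestry"].any (fun w => PySem.Str.isIn w t) then "fa-seedling"
  else "fa-briefcase"

-- ===== PORT B =====
-- GROUPS of Source B
def pvGroups : List (List String) := [
  ["developer", "programmer", "software", "engineer", "coding", "web", "app", "mobile", "frontend", "backend", "fullstack", "devops", "data", "ai", "machine learning"],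
  ["designer", "design", "creative", "graphic", "ui", "ux", "art", "visual", "illustrator", "animator"],
  ["marketing", "sales", "business", "account", "manager", "executive", "representative", "consultant"],
  ["nurse", "doctor", "medical", "health", "care", "therapist", "physician", "dentist", "pharmacist"],
  ["teacher", "professor", "instructor", "educator", "tutor", "lecturer", "academic"],
  ["accountant", "finance", "financial", "banking", "auditor", "bookkeeper", "analyst"],
  ["customer", "support", "service", "representative", "assistant", "help", "care"],
  ["engineer", "technical", "technician", "mechanic", "electrician", "plumber", "construction"],
  ["admin", "administrative", "secretary", "assistant", "coordinator", "clerk"],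
  ["lawyer", "attorney", "legal", "paralegal", "law"],
  ["scientist", "researcher", "analyst", "laboratory", "research", "phd"],
  ["driver", "delivery", "logistics", "transport", "shipping", "warehouse"],
  ["hotel", "restaurant", "chef", "cook", "waiter", "tourism", "travel"],
  ["journalist", "reporter", "writer", "editor", "media", "entertainment", "actor", "musician"],
  ["government", "public", "officer", "policy", "civil", "service"],
  ["agriculture", "farming", "environment", "conservation", "forestry"]]

-- PAIRS = [(w, i) for i, ws in enumerate(GROUPS) for w in ws]; indices are nonnegative, Nat is exact here
def pvPairs : List (String × Nat) :=
  pvGroups.zipIdx.flatMap (fun p => p.1.map (fun w => (w, p.2)))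

-- ICONS of Source B (17 entries: 16 category icons + the default at index 16)
def pvIcons : List String := ["fa-laptop-code", "fa-paint-brush", "fa-chart-line", "fa-stethoscope",
  "fa-graduation-cap", "fa-calculator", "fa-headset", "fa-cogs",
  "fa-briefcase", "fa-balance-scale", "fa-flask", "fa-truck",
  "fa-utensils", "fa-microphone", "fa-university", "fa-seedling",
  "fa-briefcase"]

def get_job_icon_alt (job_title : String) (_job_category : Option String) : String :=
  pvIcons.getD
    (pvPairs.foldl
      (fun best wp => if wp.2 < best && PySem.Str.isIn wp.1 (PySem.Str.lower job_title) then wp.2 else best)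
      pvGroups.length)
    "fa-briefcase"   -- ICONS[best]; best ≤ 16 always, so in range

-- ===== PRECONDITION & SPEC =====
def Spec_get_job_icon (job_title : String) (job_category : Option String) (out : String) : Prop := out = get_job_icon_alt job_title job_category
instance (job_title : String) (job_category : Option String) (out : String) : Decidable (Spec_get_job_icon job_title job_category out) := by unfold Spec_get_job_icon; infer_instance

-- ===== CLAIM =====
def Claim_equal_get_job_icon : Prop := ∀ (job_title : String) (job_category : Option String), Dom_get_job_icon job_title job_category → Spec_get_job_icon job_title job_category (get_job_icon job_title job_category)

-- ===== LEMMAS AND PROOFS =====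

-- the flattened pair list of a group suffix starting at priority k
def pairsFrom (k : Nat) : List (List String) → List (String × Nat)
  | [] => []
  | ws :: rest => ws.map (fun w => (w, k)) ++ pairsFrom (k + 1) rest

-- index of the first group with a keyword occurring in t
def firstIdx (t : String) : List (List String) → Option Nat
  | [] => none
  | ws :: rest => if ws.any (fun w => PySem.Str.isIn w t) then some 0 else (firstIdx t rest).map (· + 1)

-- index of the first group satisfying an abstract keyword test f (firstIdx with f abstracted)
def firstIdxF (f : String → Bool) : List (List String) → Option Nat
  | [] => none
  | ws :: rest => if ws.any f then some 0 else (firstIdxF f rest).map (· + 1)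

-- A's elif chain, recursively over parallel group/icon lists
def pvChain (t : String) : List (List String) → List String → String
  | [], _ => "fa-briefcase"
  | _ :: _, [] => "fa-briefcase"
  | ws :: rest, icon :: irest => if ws.any (fun w => PySem.Str.isIn w t) then icon else pvChain t rest irest

theorem pvPairs_eq : pvPairs = pairsFrom 0 pvGroups := by decide

theorem firstIdxF_eq (t : String) (groups : List (List String)) :
    firstIdxF (fun w => PySem.Str.isIn w t) groups = firstIdx t groups := by
  induction groups with
  | nil => rfl
  | cons ws rest ih => simp only [firstIdxF, firstIdx, ih]

theorem fold_group (f : String → Bool) (ws : List String) (k b : Nat) :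
    (ws.map (fun w => (w, k))).foldl
      (fun best wp => if wp.2 < best && f wp.1 then wp.2 else best) b
    = if k < b && ws.any f then k else b := by
  induction ws generalizing b with
  | nil => simp
  | cons w ws ih =>
    simp only [List.map_cons, List.foldl_cons, List.any_cons, ih]
    by_cases hf : f w = true <;> by_cases hk : k < b <;> simp [hf, hk]

theorem fold_pairs (f : String → Bool) (groups : List (List String)) (k b : Nat) :
    (pairsFrom k groups).foldl
      (fun best wp => if wp.2 < best && f wp.1 then wp.2 else best) b
    = match firstIdxF f groups with
      | some j => if k + j < b then k + j else b
      | none => b := by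
  induction groups generalizing k b with
  | nil => simp [pairsFrom, firstIdxF]
  | cons ws rest ih =>
    rw [pairsFrom, List.foldl_append, fold_group, firstIdxF, ih]
    cases hw : ws.any f <;> by_cases hk : k < b <;>
      cases h : firstIdxF f rest <;>
        simp [hk, Nat.add_comm, Nat.add_left_comm] <;> (try split_ifs) <;> omega

theorem firstIdx_lt (t : String) (groups : List (List String)) (j : Nat)
    (h : firstIdx t groups = some j) : j < groups.length := by
  induction groups generalizing j with
  | nil => simp [firstIdx] at h
  | cons ws rest ih =>
    simp only [firstIdx] at h
    split at h
    · injection h with h'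
      simp only [List.length_cons]; omega
    · cases hr : firstIdx t rest with
      | none => simp [hr] at h
      | some j' =>
        simp [hr] at h
        have := ih j' hr
        simp only [List.length_cons]; omega

theorem chain_eq (t : String) (groups : List (List String)) (icons : List String) :
    pvChain t groups icons
    = match firstIdx t groups with
      | some j => icons.getD j "fa-briefcase"
      | none => "fa-briefcase" := by
  induction groups generalizing icons with
  | nil => simp [pvChain, firstIdx]
  | cons ws rest ih =>
    cases icons with
    | nil =>
      simp only [pvChain, firstIdx]
      split
      · simp
      · cases h : firstIdx t rest <;> simp
    | cons icon irest =>
      simp only [pvChain, firstIdx]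
      split
      · simp
      · rw [ih]
        cases h : firstIdx t rest <;> simp

theorem A_eq_chain (job_title : String) (jc : Option String) :
    get_job_icon job_title jc = pvChain (PySem.Str.lower job_title) pvGroups pvIcons := by
  rfl

-- ===== VERDICT =====
theorem get_job_icon_spec : Claim_equal_get_job_icon := by
  intro job_title job_category _
  unfold Spec_get_job_icon
  rw [A_eq_chain, chain_eq]
  unfold get_job_icon_alt
  rw [pvPairs_eq]
  rw [fold_pairs (fun w => PySem.Str.isIn w (PySem.Str.lower job_title)), firstIdxF_eq]
  cases h : firstIdx (PySem.Str.lower job_title) pvGroups with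
  | none => rfl
  | some j =>
    have hj : j < 16 := firstIdx_lt _ _ _ h
    simp only [Nat.zero_add, pvGroups]
    simp only [List.length_cons, List.length_nil]
    rw [if_pos (by omega)]
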